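-- pv_equiv track=rewrite | github.com/ffancer/study_with_codewars_part2 | 7 kyu Rock Off!.py | solve
-- ===== SOURCE A (Python) =====
-- def solve(a, b):
--     alice_total, bob_total, alice_cnt, bob_cnt = 0, 0, 0, 0
--
--     for i in range(len(a)):
--         if a[i] == b[i]:
--             continue
--         else:
--             alice_total += a[i]
--             bob_total += b[i]
--             if a[i] > b[i]:
--                 alice_cnt += 1
--             else:
--                 bob_cnt += 1
--
--     return f'{alice_cnt}, {bob_cnt}: Alice made "Kurt" proud!' if alice_total > bob_total else \
--         f'{alice_cnt}, {bob_cnt}: Bob made "Jeff" proud!' if alice_total < bob_total else \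
--             '0, 0: that looks like a "draw"! Rock on!'
-- ===== SOURCE B (Python) =====
-- def solve(a, b):
--     # Divide-and-conquer reduction over index segments: each segment yields a
--     # triple (score difference, alice wins, bob wins); tied pairs cancel in the
--     # difference, so no tie-skipping state is needed.
--     def go(lo, hi):
--         if hi - lo == 0:
--             return (0, 0, 0)
--         if hi - lo == 1:
--             x, y = a[lo], b[lo]
--             return (x - y, 1 if x > y else 0, 1 if x < y else 0)
--         mid = (lo + hi) // 2
--         dl, al, bl = go(lo, mid)
--         dr, ar, br = go(mid, hi)
--         return (dl + dr, al + ar, bl + br)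
--
--     diff, alice, bob = go(0, len(a))
--     if diff > 0:
--         return f'{alice}, {bob}: Alice made "Kurt" proud!'
--     if diff < 0:
--         return f'{alice}, {bob}: Bob made "Jeff" proud!'
--     return '0, 0: that looks like a "draw"! Rock on!'
-- ===== Notes on version B (the rewrite author's own statement) =====
-- stated objective: alternative
-- what changed: Replaced A's left-to-right loop with four coupled accumulators (conditional totals plus counts, skipping ties) by a divide-and-conquer recursion over index segments that combines (score-difference, alice-wins, bob-wins) triples from the two halves and branches on the sign of the aggregate difference.
import Mathlib
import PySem

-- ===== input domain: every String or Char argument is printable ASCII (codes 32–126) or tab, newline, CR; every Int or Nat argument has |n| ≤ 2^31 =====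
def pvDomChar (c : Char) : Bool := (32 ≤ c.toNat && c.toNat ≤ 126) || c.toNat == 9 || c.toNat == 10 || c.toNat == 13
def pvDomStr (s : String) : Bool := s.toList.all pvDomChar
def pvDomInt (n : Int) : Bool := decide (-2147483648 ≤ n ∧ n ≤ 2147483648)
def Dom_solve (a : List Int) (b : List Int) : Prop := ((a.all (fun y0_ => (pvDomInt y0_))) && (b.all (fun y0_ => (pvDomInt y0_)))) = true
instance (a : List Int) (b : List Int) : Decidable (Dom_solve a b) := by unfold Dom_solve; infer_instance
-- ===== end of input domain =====

-- B replaces A's single left-to-right loop with four coupled accumulators by a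
-- divide-and-conquer recursion over index segments combining (diff, alice, bob) triples.

-- ===== PORT A =====
-- A's loop body; a[i]/b[i] are total via pyGetD under Pre_solve (i < len a ≤ len b).
def solveStep (a : List Int) (b : List Int) (s : Int × Int × Int × Int) (i : Int) : Int × Int × Int × Int :=
  let ai := PySem.List.pyGetD a i 0
  let bi := PySem.List.pyGetD b i 0
  if ai = bi then s
  else if ai > bi then (s.1 + ai, s.2.1 + bi, s.2.2.1 + 1, s.2.2.2)
  else (s.1 + ai, s.2.1 + bi, s.2.2.1, s.2.2.2 + 1)

def solve (a : List Int) (b : List Int) : String :=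
  let s := (PySem.List.pyRange 0 (a.length : Int) 1).foldl (solveStep a b) (0, 0, 0, 0)
  if s.1 > s.2.1 then
    PySem.Int.toStr s.2.2.1 ++ ", " ++ PySem.Int.toStr s.2.2.2 ++ ": Alice made \"Kurt\" proud!"
  else if s.1 < s.2.1 then
    PySem.Int.toStr s.2.2.1 ++ ", " ++ PySem.Int.toStr s.2.2.2 ++ ": Bob made \"Jeff\" proud!"
  else "0, 0: that looks like a \"draw\"! Rock on!"

-- ===== PORT B =====
-- B's recursive helper go(lo, hi); lo, hi are Nat since Python only calls it with
-- 0 ≤ lo ≤ hi, where '//2' coincides with Nat division.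
def solveGo (a : List Int) (b : List Int) (lo hi : Nat) : Int × Int × Int :=
  if hi - lo = 0 then (0, 0, 0)
  else if hi - lo = 1 then
    let x := PySem.List.pyGetD a (lo : Int) 0
    let y := PySem.List.pyGetD b (lo : Int) 0
    (x - y, if x > y then 1 else 0, if x < y then 1 else 0)
  else
    let mid := (lo + hi) / 2
    let l := solveGo a b lo mid
    let r := solveGo a b mid hi
    (l.1 + r.1, l.2.1 + r.2.1, l.2.2 + r.2.2)
termination_by hi - lo
decreasing_by all_goals omega

def solve_alt (a : List Int) (b : List Int) : String :=
  let t := solveGo a b 0 a.length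
  if t.1 > 0 then
    PySem.Int.toStr t.2.1 ++ ", " ++ PySem.Int.toStr t.2.2 ++ ": Alice made \"Kurt\" proud!"
  else if t.1 < 0 then
    PySem.Int.toStr t.2.1 ++ ", " ++ PySem.Int.toStr t.2.2 ++ ": Bob made \"Jeff\" proud!"
  else "0, 0: that looks like a \"draw\"! Rock on!"

-- ===== PRECONDITION & SPEC =====
-- Pre_ excludes exactly the inputs where both Pythons raise IndexError: len(b) < len(a).
def Pre_solve (a : List Int) (b : List Int) : Prop := a.length ≤ b.length
instance (a : List Int) (b : List Int) : Decidable (Pre_solve a b) := by unfold Pre_solve; infer_instance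
def pvWitness_solve : List Int × List Int := ([1, 2, 3], [3, 2, 1])

def Spec_solve (a : List Int) (b : List Int) (out : String) : Prop := out = solve_alt a b
instance (a : List Int) (b : List Int) (out : String) : Decidable (Spec_solve a b out) := by unfold Spec_solve; infer_instance

-- ===== CLAIM (what is proved, stated in full; the proofs are below) =====
def Claim_equal_solve : Prop := ∀ (a : List Int) (b : List Int), Dom_solve a b → Pre_solve a b → Spec_solve a b (solve a b)

-- ===== LEMMAS AND PROOFS =====

-- Loop invariant: A's fold state, from any start, carries diff/counts of the index list.
lemma solve_loop_inv (a b : List Int) (l : List Int) (s : Int × Int × Int × Int) :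
    (l.foldl (solveStep a b) s).1 - (l.foldl (solveStep a b) s).2.1
      = s.1 - s.2.1 + (l.map (fun i => PySem.List.pyGetD a i 0 - PySem.List.pyGetD b i 0)).sum
    ∧ (l.foldl (solveStep a b) s).2.2.1
      = s.2.2.1 + ((l.filter (fun i => PySem.List.pyGetD a i 0 > PySem.List.pyGetD b i 0)).length : Int)
    ∧ (l.foldl (solveStep a b) s).2.2.2
      = s.2.2.2 + ((l.filter (fun i => PySem.List.pyGetD a i 0 < PySem.List.pyGetD b i 0)).length : Int) := by
  induction l generalizing s with
  | nil => simp
  | cons i l ih =>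
    simp only [List.foldl_cons, List.map_cons, List.sum_cons, List.filter_cons]
    by_cases he : PySem.List.pyGetD a i 0 = PySem.List.pyGetD b i 0
    · rw [show solveStep a b s i = s from by simp [solveStep, he]]
      obtain ⟨h1, h2, h3⟩ := ih s
      have hgt : ¬ (PySem.List.pyGetD a i 0 > PySem.List.pyGetD b i 0) := by omega
      have hlt : ¬ (PySem.List.pyGetD a i 0 < PySem.List.pyGetD b i 0) := by omega
      refine ⟨?_, ?_, ?_⟩
      · rw [h1, he]; ring
      · rw [if_neg (by simpa using hgt)]; exact h2
      · rw [if_neg (by simpa using hlt)]; exact h3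
    · by_cases hg : PySem.List.pyGetD a i 0 > PySem.List.pyGetD b i 0
      · rw [show solveStep a b s i
            = (s.1 + PySem.List.pyGetD a i 0, s.2.1 + PySem.List.pyGetD b i 0, s.2.2.1 + 1, s.2.2.2) from by
          simp [solveStep, he, hg]]
        obtain ⟨h1, h2, h3⟩ := ih (s.1 + PySem.List.pyGetD a i 0, s.2.1 + PySem.List.pyGetD b i 0, s.2.2.1 + 1, s.2.2.2)
        have hlt : ¬ (PySem.List.pyGetD a i 0 < PySem.List.pyGetD b i 0) := by omega
        refine ⟨?_, ?_, ?_⟩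
        · rw [h1]; ring
        · rw [if_pos (by simpa using hg), h2, List.length_cons]; push_cast; ring
        · rw [if_neg (by simpa using hlt)]; exact h3
      · have hl : PySem.List.pyGetD a i 0 < PySem.List.pyGetD b i 0 := by omega
        rw [show solveStep a b s i
            = (s.1 + PySem.List.pyGetD a i 0, s.2.1 + PySem.List.pyGetD b i 0, s.2.2.1, s.2.2.2 + 1) from by
          simp [solveStep, he, hg]]
        obtain ⟨h1, h2, h3⟩ := ih (s.1 + PySem.List.pyGetD a i 0, s.2.1 + PySem.List.pyGetD b i 0, s.2.2.1, s.2.2.2 + 1)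
        refine ⟨?_, ?_, ?_⟩
        · rw [h1]; ring
        · rw [if_neg (by simpa using hg)]; exact h2
        · rw [if_pos (by simpa using hl), h3, List.length_cons]; push_cast; ring

-- B's divide-and-conquer equals the diff/counts of the index segment pyRange lo hi 1.
lemma solveGo_eq (a b : List Int) :
    ∀ (n lo hi : Nat), hi - lo = n →
    solveGo a b lo hi =
      ( ((PySem.List.pyRange (lo : Int) (hi : Int) 1).map
          (fun i => PySem.List.pyGetD a i 0 - PySem.List.pyGetD b i 0)).sum,
        (((PySem.List.pyRange (lo : Int) (hi : Int) 1).filter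
          (fun i => PySem.List.pyGetD a i 0 > PySem.List.pyGetD b i 0)).length : Int),
        (((PySem.List.pyRange (lo : Int) (hi : Int) 1).filter
          (fun i => PySem.List.pyGetD a i 0 < PySem.List.pyGetD b i 0)).length : Int) ) := by
  intro n
  induction n using Nat.strong_induction_on with
  | _ n ih =>
    intro lo hi hn
    by_cases h0 : hi - lo = 0
    · rw [solveGo, if_pos h0,
        PySem.List.pyRange_one_eq_nil (by exact_mod_cast Nat.le_of_sub_eq_zero h0)]
      simp
    · by_cases h1 : hi - lo = 1
      · have hhi : hi = lo + 1 := by omega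
        subst hhi
        rw [solveGo]
        have hr : PySem.List.pyRange (lo : Int) ((lo + 1 : Nat) : Int) 1 = [(lo : Int)] := by
          push_cast; exact PySem.List.pyRange_one_singleton (lo : Int)
        rw [hr, if_neg h0, if_pos h1]
        simp only [List.map_cons, List.map_nil, List.sum_cons, List.sum_nil,
          List.filter_cons, List.filter_nil, Prod.mk.injEq]
        refine ⟨by ring, ?_, ?_⟩ <;> split_ifs with h <;> simp_all <;> omega
      · have hmid1 : lo ≤ (lo + hi) / 2 := by omega
        have hmid2 : (lo + hi) / 2 ≤ hi := by omega
        have hb : solveGo a b lo hi =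
            ((solveGo a b lo ((lo + hi) / 2)).1 + (solveGo a b ((lo + hi) / 2) hi).1,
             (solveGo a b lo ((lo + hi) / 2)).2.1 + (solveGo a b ((lo + hi) / 2) hi).2.1,
             (solveGo a b lo ((lo + hi) / 2)).2.2 + (solveGo a b ((lo + hi) / 2) hi).2.2) := by
          rw [solveGo, if_neg h0, if_neg h1]
        have e1 := ih ((lo + hi) / 2 - lo) (by omega) lo ((lo + hi) / 2) rfl
        have e2 := ih (hi - (lo + hi) / 2) (by omega) ((lo + hi) / 2) hi rfl
        have hsplit : PySem.List.pyRange (lo : Int) (hi : Int) 1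
            = PySem.List.pyRange (lo : Int) (((lo + hi) / 2 : Nat) : Int) 1
              ++ PySem.List.pyRange (((lo + hi) / 2 : Nat) : Int) (hi : Int) 1 :=
          (PySem.List.pyRange_one_append (lo : Int) (((lo + hi) / 2 : Nat) : Int) (hi : Int)
            (by exact_mod_cast hmid1) (by exact_mod_cast hmid2))
        rw [hb, e1, e2, hsplit]
        simp [List.filter_append]

-- ===== VERDICT (by name: the statement is the Claim_ definition above) =====
theorem solve_spec : Claim_equal_solve := by
  intro a b _ _
  unfold Spec_solve
  obtain ⟨h1, h2, h3⟩ := solve_loop_inv a b (PySem.List.pyRange 0 (a.length : Int) 1) (0, 0, 0, 0)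
  norm_num at h1 h2 h3
  have hgo := solveGo_eq a b (a.length - 0) 0 a.length rfl
  simp only [solve, solve_alt, hgo, Nat.cast_zero]
  rw [h2, h3]
  split_ifs <;> first | rfl | (exfalso; omega)
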